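-- pv_equiv track=rewrite | github.com/theryanslvdr/CCT-Hub | tests/test_profit_tracker_v2.py | _group_months_by_year
-- ===== SOURCE A (Python) =====
-- def _group_months_by_year(monthly_data):
--     """Helper: Group months by year"""
--     years = {}
--     for m in monthly_data:
--         year = m["year"]
--         if year not in years:
--             years[year] = []
--         years[year].append(m)
--     return years
-- ===== SOURCE B (Python) =====
-- def _group_months_by_year(monthly_data):
--     """Group months by year: collect distinct years in first-appearance order,
--     then build each year's bucket with a filter pass over the whole list."""
--     seen = []
--     for m in monthly_data:
--         y = m["year"]
--         if y not in seen:
--             seen.append(y)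
--     return {y: [m for m in monthly_data if m["year"] == y] for y in seen}
-- ===== Notes on version B (the rewrite author's own statement) =====
-- stated objective: alternative
-- what changed: A builds buckets in one pass with a dict of lists; B first collects the distinct years in order of first appearance and then builds each year's bucket with a filter pass over the whole input.
import Mathlib
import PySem

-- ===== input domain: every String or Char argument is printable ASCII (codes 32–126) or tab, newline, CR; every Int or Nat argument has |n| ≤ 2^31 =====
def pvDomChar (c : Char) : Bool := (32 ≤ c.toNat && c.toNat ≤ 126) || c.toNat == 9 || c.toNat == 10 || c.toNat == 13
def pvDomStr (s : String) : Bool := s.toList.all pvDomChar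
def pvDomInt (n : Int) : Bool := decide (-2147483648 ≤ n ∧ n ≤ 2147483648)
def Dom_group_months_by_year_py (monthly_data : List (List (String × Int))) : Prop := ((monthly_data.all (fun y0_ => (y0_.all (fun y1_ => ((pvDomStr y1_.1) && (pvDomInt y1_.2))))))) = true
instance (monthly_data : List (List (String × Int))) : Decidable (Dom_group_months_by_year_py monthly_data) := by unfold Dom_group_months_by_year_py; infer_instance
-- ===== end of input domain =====

-- B replaces A's one-pass dict-of-buckets grouping by a distinct-years scan followed by
-- one filter pass per year (alternative decomposition, same results).

-- m["year"]: first-match lookup in the record's association list; Python raises KeyError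
-- when the key is absent — those inputs are excluded by Pre_ below (the `.getD 0` default
-- is never reached on admitted inputs).
def pvYear (m : List (String × Int)) : Int :=
  ((m.find? (fun p => p.1 == "year")).map (·.2)).getD 0

-- ===== PORT A =====
def group_months_by_year_py (monthly_data : List (List (String × Int))) : List (Int × List (List (String × Int))) :=
  (monthly_data.foldl
    (fun years m =>
      let year := pvYear m
      let years := if years.contains year then years else years.insert year ([] : List (List (String × Int)))
      years.modify year [] (fun l => l ++ [m]))
    PySem.Dict.empty).items

-- ===== PORT B =====
def group_months_by_year_py_alt (monthly_data : List (List (String × Int))) : List (Int × List (List (String × Int))) :=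
  let seen : PySem.Set Int := monthly_data.foldl (fun s m => PySem.Set.add s (pvYear m)) PySem.Set.empty
  seen.map (fun y => (y, monthly_data.filter (fun m => pvYear m == y)))

-- ===== PRECONDITION & SPEC =====
-- Pre_ excludes exactly the inputs where some record lacks the "year" key, on which
-- the Python A raises KeyError.
def Pre_group_months_by_year_py (monthly_data : List (List (String × Int))) : Prop :=
  ∀ m ∈ monthly_data, "year" ∈ m.map Prod.fst
instance (monthly_data : List (List (String × Int))) : Decidable (Pre_group_months_by_year_py monthly_data) := by unfold Pre_group_months_by_year_py; infer_instance

def pvWitness_group_months_by_year_py : (List (List (String × Int))) :=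
  [[("year", 2020), ("profit", 5)], [("year", 2021), ("profit", 7)], [("year", 2020), ("profit", 9)]]

def Spec_group_months_by_year_py (monthly_data : List (List (String × Int))) (out : List (Int × List (List (String × Int)))) : Prop := out = group_months_by_year_py_alt monthly_data
instance (monthly_data : List (List (String × Int))) (out : List (Int × List (List (String × Int)))) : Decidable (Spec_group_months_by_year_py monthly_data out) := by unfold Spec_group_months_by_year_py; infer_instance

-- ===== CLAIM (what is proved, stated in full; the proofs are below) =====
def Claim_equal_group_months_by_year_py : Prop := ∀ (monthly_data : List (List (String × Int))), Dom_group_months_by_year_py monthly_data → Pre_group_months_by_year_py monthly_data → Spec_group_months_by_year_py monthly_data (group_months_by_year_py monthly_data)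

-- ===== LEMMAS AND PROOFS =====

-- A's "ensure key then append" step equals a single modify with default [].
theorem pv_step_eq (d : PySem.Dict Int (List (List (String × Int)))) (m : List (String × Int)) :
    (if d.contains (pvYear m) then d else d.insert (pvYear m) ([] : List (List (String × Int)))).modify (pvYear m) [] (fun l => l ++ [m])
      = d.modify (pvYear m) [] (fun l => l ++ [m]) := by
  by_cases h : d.contains (pvYear m) = true
  · simp [h]
  · have h' : d.contains (pvYear m) = false := by simpa using h
    rw [if_neg (by simp [h'])]
    simp only [PySem.Dict.modify, PySem.Dict.getD_insert_self, PySem.Dict.insert_insert_self,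
      PySem.Dict.getD_of_not_contains d _ h']

theorem group_months_by_year_py_eq_alt (monthly_data : List (List (String × Int))) :
    group_months_by_year_py monthly_data = group_months_by_year_py_alt monthly_data := by
  unfold group_months_by_year_py group_months_by_year_py_alt
  have hfun : (fun (years : PySem.Dict Int (List (List (String × Int)))) (m : List (String × Int)) =>
      let year := pvYear m
      let years := if years.contains year then years else years.insert year ([] : List (List (String × Int)))
      years.modify year [] (fun l => l ++ [m]))
      = (fun d m => d.modify (pvYear m) [] (fun l => l ++ [m])) := by
    funext d m
    exact pv_step_eq d m
  rw [hfun]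
  have hkeys : (monthly_data.foldl (fun d m => d.modify (pvYear m) [] (fun l => l ++ [m])) PySem.Dict.empty).keys
      = PySem.Set.ofList (monthly_data.map pvYear) := by
    rw [PySem.Dict.keys_foldl_modify_key monthly_data pvYear [] (fun _ m l => l ++ [m]) PySem.Dict.empty,
      PySem.Dict.keys_empty, PySem.Set.update_nil_left]
  have hnd : (monthly_data.foldl (fun d m => d.modify (pvYear m) [] (fun l => l ++ [m])) PySem.Dict.empty).keys.Nodup :=
    PySem.Dict.nodup_keys_foldl_modify_key monthly_data pvYear [] (fun _ m l => l ++ [m]) PySem.Dict.empty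
      PySem.Dict.nodup_keys_empty
  have hgetD : ∀ c : Int, (monthly_data.foldl (fun d m => d.modify (pvYear m) [] (fun l => l ++ [m])) PySem.Dict.empty).getD c []
      = monthly_data.filter (fun m => pvYear m == c) := by
    intro c
    have h := PySem.Dict.getD_foldl_modify_append (monthly_data.map (fun m => (pvYear m, m))) PySem.Dict.empty c
    rw [List.foldl_map] at h
    simpa [PySem.Dict.getD_empty, List.filter_map, Function.comp_def, List.map_map] using h
  have hseen : (monthly_data.foldl (fun s m => PySem.Set.add s (pvYear m)) PySem.Set.empty)
      = PySem.Set.ofList (monthly_data.map pvYear) := by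
    rw [← PySem.Set.update_map_eq_foldl_add, PySem.Set.update_empty]
  rw [PySem.Dict.items_eq_map_keys _ hnd [], hkeys, hseen]
  exact List.map_congr_left (fun k _ => by rw [hgetD k])

-- ===== VERDICT (by name: the statement is the Claim_ definition above) =====
theorem group_months_by_year_py_spec : Claim_equal_group_months_by_year_py := by
  intro md _ _
  exact group_months_by_year_py_eq_alt md
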